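-- pv_equiv track=rewrite | github.com/chocoteam/choco-solver | src/chocofzn/Arrays.py | _sawtooth
-- ===== SOURCE A (Python) =====
-- def _sawtooth(array):
--     k = 0
--     while k < len(array) - 1 and array[k] == array[k + 1]:
--         k += 1
--     if k >= len(array) - 1:
--         return False
--     up = array[k] <= array[k + 1]
--     c = 1
--     for i in range(len(array) - 1):
--         if up:
--             if array[i] > array[i + 1]:
--                 c += 1
--                 up = False
--         if not up:
--             if array[i] < array[i + 1]:
--                 c += 1
--                 up = True
--     return c
-- ===== SOURCE B (Python) =====
-- def _sawtooth(array):
--     signs = [1 if a < b else -1 for a, b in zip(array, array[1:]) if a != b]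
--     if not signs:
--         return False
--     return 1 + sum(x != y for x, y in zip(signs, signs[1:]))
-- ===== Notes on version B (the rewrite author's own statement) =====
-- stated objective: simpler
-- what changed: Replaced the leading skip-equals while-loop plus a toggling `up`/counter state machine with two plain passes: map consecutive pairs to a list of non-zero direction signs, then return 1 + the number of adjacent sign changes (False when the sign list is empty).
-- outside the precondition, e.g. on _sawtooth([]): A returns False, B returns False; on _sawtooth([5, 5]): A returns False, B returns False
import Mathlib
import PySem

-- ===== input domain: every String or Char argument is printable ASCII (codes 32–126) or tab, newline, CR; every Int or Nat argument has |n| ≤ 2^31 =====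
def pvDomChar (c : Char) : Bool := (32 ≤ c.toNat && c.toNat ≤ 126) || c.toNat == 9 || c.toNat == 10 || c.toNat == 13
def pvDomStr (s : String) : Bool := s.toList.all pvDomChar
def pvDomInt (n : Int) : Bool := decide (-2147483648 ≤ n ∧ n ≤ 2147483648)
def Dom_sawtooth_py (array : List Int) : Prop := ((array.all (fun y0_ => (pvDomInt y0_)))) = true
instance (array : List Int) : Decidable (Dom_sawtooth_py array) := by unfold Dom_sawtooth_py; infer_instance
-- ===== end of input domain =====

-- B replaces A's fused skip-equal while-loop + toggling `up` state machine by a sign-list pass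
-- followed by an adjacent-changes count; objective: simpler (same O(n) cost).
-- Python's `return False` on monotone-free (all-equal or short) arrays is ported as 0 (False == 0 in Python).

-- ===== PORT A =====
-- while k < len(array)-1 and array[k] == array[k+1]: k += 1
def pvFindK (array : List Int) (k : Nat) : Nat :=
  if h : (k : Int) < (array.length : Int) - 1 ∧ array.getD k 0 = array.getD (k+1) 0 then
    pvFindK array (k+1)
  else k
termination_by array.length - k
decreasing_by omega

def sawtooth_py (array : List Int) : Int :=
  let k := pvFindK array 0
  if (k : Int) ≥ (array.length : Int) - 1 then 0
  else
    let init : Bool × Int := (decide (array.getD k 0 ≤ array.getD (k+1) 0), 1)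
    ((List.range (array.length - 1)).foldl (fun s i =>
      let s1 := if s.1 then (if array.getD i 0 > array.getD (i+1) 0 then (false, s.2 + 1) else s) else s
      if !s1.1 then (if array.getD i 0 < array.getD (i+1) 0 then (true, s1.2 + 1) else s1) else s1)
      init).2

-- ===== PORT B =====
-- [1 if a < b else -1 for a, b in zip(array, array[1:]) if a != b]
def pvSigns (l : List Int) : List Int :=
  (l.zip l.tail).filterMap (fun p => if p.1 ≠ p.2 then some (if p.1 < p.2 then (1 : Int) else -1) else none)

def sawtooth_py_alt (array : List Int) : Int :=
  let signs := pvSigns array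
  if signs.isEmpty then 0
  else 1 + ((signs.zip signs.tail).countP (fun p => decide (p.1 ≠ p.2)) : Int)

-- ===== PRECONDITION & SPEC =====
-- Pre_ excludes the arrays with no strictly increasing or decreasing adjacent pair (length ≤ 1 or
-- all elements equal): there Python A (and B alike) returns the bool False instead of an int count.
def Pre_sawtooth_py (array : List Int) : Prop :=
  (array.zip array.tail).any (fun p => decide (p.1 ≠ p.2)) = true
instance (array : List Int) : Decidable (Pre_sawtooth_py array) := by unfold Pre_sawtooth_py; infer_instance
def pvWitness_sawtooth_py : List Int := [1, 2]

def Spec_sawtooth_py (array : List Int) (out : Int) : Prop := out = sawtooth_py_alt array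
instance (array : List Int) (out : Int) : Decidable (Spec_sawtooth_py array out) := by unfold Spec_sawtooth_py; infer_instance

-- ===== CLAIM (what is proved, stated in full; the proofs are below) =====
def Claim_equal_sawtooth_py : Prop := ∀ (array : List Int), Dom_sawtooth_py array → Pre_sawtooth_py array → Spec_sawtooth_py array (sawtooth_py array)

-- ===== LEMMAS AND PROOFS =====

-- signs of a pair list (pvSigns l = pvPairSigns (l.zip l.tail))
def pvPairSigns (ps : List (Int × Int)) : List Int :=
  ps.filterMap (fun p => if p.1 ≠ p.2 then some (if p.1 < p.2 then (1 : Int) else -1) else none)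

-- A's loop body on one pair
def pvStep (s : Bool × Int) (a b : Int) : Bool × Int :=
  let s1 := if s.1 then (if a > b then (false, s.2 + 1) else s) else s
  if !s1.1 then (if a < b then (true, s1.2 + 1) else s1) else s1

-- direction after processing a sign list, and number of direction changes
def pvDir (u : Bool) : List Int → Bool
  | [] => u
  | s :: r => pvDir (decide (s = 1)) r

def pvAlt (u : Bool) : List Int → Int
  | [] => 0
  | s :: r => (if decide (s = 1) = u then (0 : Int) else 1) + pvAlt (decide (s = 1)) r

lemma foldl_range_pairs_cons {σ : Type} (f : σ → Int → Int → σ) :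
    ∀ (l : List Int) (x : Int) (init : σ),
      (List.range l.length).foldl (fun s i => f s ((x :: l).getD i 0) ((x :: l).getD (i+1) 0)) init
        = ((x :: l).zip l).foldl (fun s p => f s p.1 p.2) init := by
  intro l
  induction l with
  | nil => intro x init; simp
  | cons y l ih =>
    intro x init
    simp only [List.length_cons]
    rw [List.range_succ_eq_map, List.foldl_cons, List.foldl_map]
    simpa using ih y (f init x y)

lemma foldl_range_pairs {σ : Type} (f : σ → Int → Int → σ) (a : List Int) (init : σ) :
    (List.range (a.length - 1)).foldl (fun s i => f s (a.getD i 0) (a.getD (i+1) 0)) init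
      = (a.zip a.tail).foldl (fun s p => f s p.1 p.2) init := by
  cases a with
  | nil => simp
  | cons x l => simpa using foldl_range_pairs_cons f l x init

lemma pvStep_lt {u : Bool} {c a b : Int} (hab : a < b) :
    pvStep (u, c) a b = (true, if u then c else c + 1) := by
  cases u <;> simp [pvStep, hab, not_lt_of_gt hab]

lemma pvStep_gt {u : Bool} {c a b : Int} (hab : b < a) :
    pvStep (u, c) a b = (false, if u then c + 1 else c) := by
  cases u <;> simp [pvStep, hab, not_lt_of_gt hab]

lemma pvStep_eq {u : Bool} {c a : Int} : pvStep (u, c) a a = (u, c) := by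
  cases u <;> simp [pvStep]

lemma foldl_step_eq (ps : List (Int × Int)) :
    ∀ (u : Bool) (c : Int),
      ps.foldl (fun s p => pvStep s p.1 p.2) (u, c)
        = (pvDir u (pvPairSigns ps), c + pvAlt u (pvPairSigns ps)) := by
  induction ps with
  | nil => intro u c; simp [pvPairSigns, pvDir, pvAlt]
  | cons p ps ih =>
    intro u c
    obtain ⟨a, b⟩ := p
    rw [List.foldl_cons]
    rcases lt_trichotomy a b with hab | hab | hab
    · have hne : a ≠ b := ne_of_lt hab
      show List.foldl _ (pvStep (u, c) a b) ps = _
      rw [pvStep_lt hab, ih]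
      simp only [pvPairSigns, List.filterMap_cons, if_pos hne, if_pos hab]
      rw [pvDir, pvAlt]
      cases u <;> simp <;> ring
    · subst hab
      show List.foldl _ (pvStep (u, c) a a) ps = _
      rw [pvStep_eq, ih]
      simp [pvPairSigns]
    · have hne : a ≠ b := ne_of_gt hab
      show List.foldl _ (pvStep (u, c) a b) ps = _
      rw [pvStep_gt hab, ih]
      simp only [pvPairSigns, List.filterMap_cons, if_pos hne, if_neg (not_lt_of_gt hab)]
      rw [pvDir, pvAlt]
      cases u <;> simp <;> ring

-- signs of the pairs of a suffix
def pvTailSigns (a : List Int) (k : Nat) : List Int :=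
  pvPairSigns ((a.drop k).zip (a.drop k).tail)

lemma pvSigns_eq_tailSigns (a : List Int) : pvSigns a = pvTailSigns a 0 := by
  simp [pvSigns, pvTailSigns, pvPairSigns]

lemma drop_cons_of_lt (a : List Int) (k : Nat) (h : k < a.length) :
    a.drop k = a.getD k 0 :: a.drop (k+1) := by
  rw [List.drop_eq_getElem_cons h]
  simp [List.getD, List.getElem?_eq_getElem h]

lemma pvFindK_signs (a : List Int) : ∀ (k : Nat), pvTailSigns a k = pvTailSigns a (pvFindK a k) := by
  intro k
  fun_induction pvFindK a k with
  | case1 k h ih =>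
    have hk1 : k + 1 < a.length := by omega
    rw [← ih]
    unfold pvTailSigns
    rw [drop_cons_of_lt a k (by omega), drop_cons_of_lt a (k+1) hk1]
    have he : a[k]?.getD 0 = a[k+1]?.getD 0 := h.2
    simp [pvPairSigns, he]
  | case2 k h => rfl

lemma pvFindK_stop (a : List Int) (k : Nat) :
    ¬ (((pvFindK a k : Nat) : Int) < (a.length : Int) - 1 ∧
        a.getD (pvFindK a k) 0 = a.getD (pvFindK a k + 1) 0) := by
  fun_induction pvFindK a k with
  | case1 k h ih => exact ih
  | case2 k h => exact h

lemma countP_zip_tail_eq_pvAlt :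
    ∀ (rest : List Int) (s0 : Int), (∀ s ∈ s0 :: rest, s = 1 ∨ s = -1) →
      ((((s0 :: rest).zip rest).countP (fun p => decide (p.1 ≠ p.2)) : Nat) : Int)
        = pvAlt (decide (s0 = 1)) rest := by
  intro rest
  induction rest with
  | nil => intro s0 _; simp [pvAlt]
  | cons s1 r ih =>
    intro s0 hmem
    have h1 := ih s1 (fun s hs => hmem s (by simp at hs ⊢; tauto))
    have hs0 := hmem s0 (by simp)
    have hs1 := hmem s1 (by simp)
    rw [List.zip_cons_cons, List.countP_cons, pvAlt, ← h1]
    rcases hs0 with h | h <;> rcases hs1 with h' | h' <;> subst h <;> subst h' <;>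
      simp <;> ring

lemma mem_pvPairSigns (ps : List (Int × Int)) (s : Int) (h : s ∈ pvPairSigns ps) :
    s = 1 ∨ s = -1 := by
  simp only [pvPairSigns, List.mem_filterMap] at h
  obtain ⟨p, _, hp⟩ := h
  by_cases hne : p.1 ≠ p.2 <;> simp [hne] at hp
  split at hp <;> omega

lemma zip_tail_nil_of_short (l : List Int) (h : l.length ≤ 1) : l.zip l.tail = [] := by
  cases l with
  | nil => rfl
  | cons x t => cases t with
    | nil => rfl
    | cons y r => simp at h

lemma sawtooth_main (a : List Int) : sawtooth_py a = sawtooth_py_alt a := by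
  have hsig := pvFindK_signs a 0
  rw [← pvSigns_eq_tailSigns] at hsig
  set K := pvFindK a 0 with hK
  by_cases hend : ((K : Nat) : Int) ≥ (a.length : Int) - 1
  · -- all pairs (if any) equal: signs empty, both return 0
    have hempty : pvSigns a = [] := by
      rw [hsig, pvTailSigns, zip_tail_nil_of_short]
      · rfl
      · have := List.length_drop (l := a) (i := K); omega
    rw [sawtooth_py, sawtooth_py_alt]
    simp only [← hK]
    rw [if_pos hend, hempty]
    simp
  · rw [not_le] at hend
    have hKlt : K + 1 < a.length := by omega
    have hne : a.getD K 0 ≠ a.getD (K+1) 0 := by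
      have h := pvFindK_stop a 0
      rw [← hK] at h
      tauto
    have hcons : pvSigns a
        = (if a.getD K 0 < a.getD (K+1) 0 then (1 : Int) else -1) :: pvTailSigns a (K+1) := by
      rw [hsig]
      unfold pvTailSigns
      rw [drop_cons_of_lt a K (by omega), drop_cons_of_lt a (K+1) hKlt]
      have hne' : a[K]?.getD 0 ≠ a[K+1]?.getD 0 := hne
      simp [pvPairSigns, hne']
    set s0 : Int := if a.getD K 0 < a.getD (K+1) 0 then (1 : Int) else -1 with hs0
    set rest : List Int := pvTailSigns a (K+1) with hrest
    have hmem : ∀ s ∈ s0 :: rest, s = 1 ∨ s = -1 := by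
      intro s hs
      rw [← hcons] at hs
      exact mem_pvPairSigns _ s hs
    have hd0 : decide (s0 = 1) = decide (a.getD K 0 ≤ a.getD (K+1) 0) := by
      rcases lt_or_gt_of_ne hne with hlt | hgt
      · have h1 : s0 = 1 := by rw [hs0, if_pos hlt]
        simp [h1]
        exact le_of_lt hlt
      · have h1 : s0 = -1 := by rw [hs0, if_neg (not_lt_of_gt hgt)]
        simp [h1]
        exact hgt
    -- A's side
    rw [sawtooth_py]
    simp only [← hK]
    rw [if_neg (not_le.mpr hend)]
    rw [show (fun (s : Bool × Int) (i : Nat) =>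
          let s1 := if s.1 then (if a.getD i 0 > a.getD (i+1) 0 then (false, s.2 + 1) else s) else s
          if !s1.1 then (if a.getD i 0 < a.getD (i+1) 0 then (true, s1.2 + 1) else s1) else s1)
        = (fun (s : Bool × Int) (i : Nat) => pvStep s (a.getD i 0) (a.getD (i+1) 0)) from rfl]
    rw [foldl_range_pairs pvStep a _, foldl_step_eq]
    -- B's side
    rw [sawtooth_py_alt]
    simp only []
    rw [show pvPairSigns (a.zip a.tail) = pvSigns a from rfl, hcons]
    simp only [List.isEmpty_cons, Bool.false_eq_true, if_false, List.tail_cons]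
    rw [countP_zip_tail_eq_pvAlt rest s0 hmem]
    rw [pvAlt, hd0]
    simp

-- ===== VERDICT (by name: the statement is the Claim_ definition above) =====
theorem sawtooth_py_spec : Claim_equal_sawtooth_py := by
  intro a _ _
  unfold Spec_sawtooth_py
  exact sawtooth_main a
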